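-- pv_equiv track=rewrite | github.com/neardata-eu/lithops-hpc | examples/mdr/mdr_parts.py | compute_chunk_ranges
-- ===== SOURCE A (Python) =====
-- import math
--
-- def compute_chunk_ranges(n_tasks, n_workers):
--     """Compute ranges (list indexes) to split n_tasks into n_workers."""
--     chunk_size = math.ceil(n_tasks / n_workers)
--     chunk_ranges = []
--     start = 0
--
--     for _ in range(n_workers):
--         end = min(start + chunk_size, n_tasks)
--         chunk_ranges.append((start, end))
--         start = end
--         if start >= n_tasks:
--             break
--     return chunk_ranges
-- ===== SOURCE B (Python) =====
-- import math
--
-- def compute_chunk_ranges(n_tasks, n_workers):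
--     """Compute ranges (list indexes) to split n_tasks into n_workers."""
--     chunk_size = math.ceil(n_tasks / n_workers)
--     if chunk_size <= 0:
--         return []  # no tasks to split
--     return [(start, min(start + chunk_size, n_tasks))
--             for start in range(0, n_tasks, chunk_size)]
-- ===== Notes on version B (the rewrite author's own statement) =====
-- stated objective: alternative
-- what changed: Replaces the stateful loop over workers with a running start/end accumulator and a mid-loop break by a single comprehension over the chunk starts range(0, n_tasks, chunk_size), computing each range in closed form.
-- intended difference: When n_tasks <= 0 and n_workers >= 1 A returns [(0, n_tasks)] (an empty or even negative-end range appended on the first iteration before its break fires), while B returns [], the intended 'no tasks, no ranges' answer. — e.g. on compute_chunk_ranges(0, 1): A returns [(0, 0)], B returns []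
import Mathlib
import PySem

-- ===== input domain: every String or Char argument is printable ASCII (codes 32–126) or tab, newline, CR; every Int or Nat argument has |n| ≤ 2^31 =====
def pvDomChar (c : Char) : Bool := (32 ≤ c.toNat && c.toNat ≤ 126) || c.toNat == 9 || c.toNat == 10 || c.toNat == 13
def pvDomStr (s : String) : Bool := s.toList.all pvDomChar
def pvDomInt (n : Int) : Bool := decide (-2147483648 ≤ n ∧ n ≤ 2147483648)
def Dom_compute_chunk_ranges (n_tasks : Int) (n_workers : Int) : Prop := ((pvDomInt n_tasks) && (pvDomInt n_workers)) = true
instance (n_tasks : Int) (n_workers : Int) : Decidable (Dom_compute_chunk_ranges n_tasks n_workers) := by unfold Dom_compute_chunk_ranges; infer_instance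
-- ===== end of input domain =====

-- B replaces A's stateful accumulate-and-break loop by a closed-form filtered
-- comprehension (alternative decomposition, same cost); for n_tasks <= 0 B returns []
-- where A returns the degenerate [(0, n_tasks)] (stated as an intended difference D_).


-- ===== PORT A =====
-- math.ceil(a / b): on |a|, |b| ≤ 2^31 the float quotient a/b is either exact or more
-- than half an ulp away from any integer (that would need |a| > 2^53), so ceil of the
-- float equals the exact ceiling -((-a) // b); ported as such, exact on Dom.
def pvCeilDiv (a : Int) (b : Int) : Int := -(PySem.Int.floordiv (-a) b)

-- the 'for _ in range(n_workers)' loop with running start and mid-loop break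
def aChunkLoop (n : Int) (cs : Int) : Nat → Int → List (Int × Int)
  | 0, _ => []
  | fuel + 1, start =>
      let e := min (start + cs) n
      (start, e) :: (if n ≤ e then [] else aChunkLoop n cs fuel e)

def compute_chunk_ranges (n_tasks : Int) (n_workers : Int) : List (Int × Int) :=
  aChunkLoop n_tasks (pvCeilDiv n_tasks n_workers) n_workers.toNat 0

-- ===== PORT B =====
-- the comprehension '[… for start in range(0, n_tasks, chunk_size)]'
def compute_chunk_ranges_alt (n_tasks : Int) (n_workers : Int) : List (Int × Int) :=
  let cs := pvCeilDiv n_tasks n_workers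
  if cs ≤ 0 then []
  else (PySem.List.pyRange 0 n_tasks cs).map
    (fun start => (start, min (start + cs) n_tasks))

-- ===== PRECONDITION & SPEC =====
-- Pre_ excludes only n_workers = 0, where A raises ZeroDivisionError.
def Pre_compute_chunk_ranges (n_tasks : Int) (n_workers : Int) : Prop := n_workers ≠ 0
instance (n_tasks : Int) (n_workers : Int) : Decidable (Pre_compute_chunk_ranges n_tasks n_workers) := by unfold Pre_compute_chunk_ranges; infer_instance
def pvWitness_compute_chunk_ranges : Int × Int := (10, 3)

-- When n_tasks ≤ 0 and n_workers ≥ 1, A returns [(0, n_tasks)] — an empty or even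
-- negative-end range appended before its break fires — while B returns [], the
-- intended 'no tasks, no ranges' answer.
def D_compute_chunk_ranges (n_tasks : Int) (n_workers : Int) : Prop := n_tasks ≤ 0 ∧ 1 ≤ n_workers
instance (n_tasks : Int) (n_workers : Int) : Decidable (D_compute_chunk_ranges n_tasks n_workers) := by unfold D_compute_chunk_ranges; infer_instance

def Spec_compute_chunk_ranges (n_tasks : Int) (n_workers : Int) (out : List (Int × Int)) : Prop := ¬ D_compute_chunk_ranges n_tasks n_workers → out = compute_chunk_ranges_alt n_tasks n_workers
instance (n_tasks : Int) (n_workers : Int) (out : List (Int × Int)) : Decidable (Spec_compute_chunk_ranges n_tasks n_workers out) := by unfold Spec_compute_chunk_ranges; infer_instance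

def pvDiffWitness_compute_chunk_ranges : Int × Int := (0, 1)
def pvDiffWitnessOut_compute_chunk_ranges : (List (Int × Int)) × (List (Int × Int)) := ([(0, 0)], [])

-- ===== CLAIM (what is proved, stated in full; the proofs are below) =====
def Claim_unchanged_compute_chunk_ranges : Prop := ∀ (n_tasks : Int) (n_workers : Int), Dom_compute_chunk_ranges n_tasks n_workers → Pre_compute_chunk_ranges n_tasks n_workers → Spec_compute_chunk_ranges n_tasks n_workers (compute_chunk_ranges n_tasks n_workers)
def Claim_changed_compute_chunk_ranges : Prop := Dom_compute_chunk_ranges (pvDiffWitness_compute_chunk_ranges.1) (pvDiffWitness_compute_chunk_ranges.2) ∧ Pre_compute_chunk_ranges (pvDiffWitness_compute_chunk_ranges.1) (pvDiffWitness_compute_chunk_ranges.2) ∧ D_compute_chunk_ranges (pvDiffWitness_compute_chunk_ranges.1) (pvDiffWitness_compute_chunk_ranges.2) ∧ compute_chunk_ranges (pvDiffWitness_compute_chunk_ranges.1) (pvDiffWitness_compute_chunk_ranges.2) = pvDiffWitnessOut_compute_chunk_ranges.1 ∧ compute_chunk_ranges_alt (pvDiffWitness_compute_chunk_ranges.1)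 (pvDiffWitness_compute_chunk_ranges.2) = pvDiffWitnessOut_compute_chunk_ranges.2 ∧ pvDiffWitnessOut_compute_chunk_ranges.1 ≠ pvDiffWitnessOut_compute_chunk_ranges.2
def Claim_exact_compute_chunk_ranges : Prop := ∀ (n_tasks : Int) (n_workers : Int), Dom_compute_chunk_ranges n_tasks n_workers → Pre_compute_chunk_ranges n_tasks n_workers → D_compute_chunk_ranges n_tasks n_workers → compute_chunk_ranges n_tasks n_workers ≠ compute_chunk_ranges_alt n_tasks n_workers

-- ===== LEMMAS AND PROOFS =====

-- ceiling-division brackets: for 0 < b, (q-1)*b < a ≤ q*b where q = pvCeilDiv a b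
theorem pvCeilDiv_bounds (a b : Int) (hb : 0 < b) :
    (pvCeilDiv a b - 1) * b < a ∧ a ≤ pvCeilDiv a b * b :=
  (PySem.Int.neg_floordiv_neg_eq_iff_of_pos hb).mp rfl

-- the number of chunk starts below n: (n + cs - 1) / cs = ceil(n / cs)  (n > 0, cs ≥ 1)
theorem bCount_eq (n cs : Int) (_hn : 0 < n) (hcs : 1 ≤ cs)
    (hm : n ≤ pvCeilDiv n cs * cs) (hm' : (pvCeilDiv n cs - 1) * cs < n) :
    (n - 0 + cs - 1) / cs = pvCeilDiv n cs := by
  have hcs' : (0:Int) < cs := by omega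
  refine le_antisymm ?_ ((Int.le_ediv_iff_mul_le hcs').mpr (by nlinarith))
  have h : (n - 0 + cs - 1) / cs < pvCeilDiv n cs + 1 :=
    (Int.ediv_lt_iff_lt_mul hcs').mpr (by nlinarith)
  omega

-- main loop lemma (n > 0, cs ≥ 1): starting at i*cs with fuel (w - i).toNat, A's
-- loop produces exactly the closed-form chunks for indices i, …, min w c - 1
theorem aChunkLoop_eq (n cs w : Int) (_hn : 0 < n) (hcs : 1 ≤ cs)
    (hm : n ≤ pvCeilDiv n cs * cs) (hm' : (pvCeilDiv n cs - 1) * cs < n) :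
    ∀ (fuel : Nat) (i : Int), 0 ≤ i → i < min w (pvCeilDiv n cs) →
      fuel = (w - i).toNat →
      aChunkLoop n cs fuel (i * cs) =
        (PySem.List.pyRange i (min w (pvCeilDiv n cs)) 1).map
          (fun j => (j * cs, min ((j + 1) * cs) n)) := by
  intro fuel
  induction fuel with
  | zero => intro i hi him hf; omega
  | succ k ih =>
      intro i hi him hf
      set m := min w (pvCeilDiv n cs) with hmdef
      rw [PySem.List.pyRange_one_cons (by omega)]
      simp only [aChunkLoop, List.map_cons]
      have heq : i * cs + cs = (i + 1) * cs := by ring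
      rw [heq]
      by_cases hbr : n ≤ min ((i + 1) * cs) n
      · -- break: n ≤ (i+1)*cs, so i+1 ≥ ceil(n/cs) and the tail range is empty
        have h1 : n ≤ (i + 1) * cs := by omega
        have hge : pvCeilDiv n cs ≤ i + 1 := by nlinarith
        rw [if_pos hbr, PySem.List.pyRange_one_eq_nil (by omega)]
        simp
      · -- no break: (i+1)*cs < n, recurse at i+1
        have h1 : (i + 1) * cs < n := by omega
        have hlt : i + 1 < pvCeilDiv n cs := by nlinarith
        rw [if_neg hbr]
        have hmin : min ((i + 1) * cs) n = (i + 1) * cs := by omega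
        rw [hmin]
        by_cases hiw : i + 1 < w
        · rw [ih (i + 1) (by omega) (by omega) (by omega)]
        · -- i+1 = w: the loop's fuel runs out exactly as the range ends
          have hk : k = 0 := by omega
          subst hk
          rw [PySem.List.pyRange_one_eq_nil (by omega)]
          simp [aChunkLoop]

-- inside D_ (n ≤ 0, w ≥ 1): chunk_size ≤ 0, so B returns []
theorem bNil_of_D (n w : Int) (hn : n ≤ 0) (hw : 1 ≤ w) :
    compute_chunk_ranges_alt n w = [] := by
  simp only [compute_chunk_ranges_alt]
  obtain ⟨hub, hlb⟩ := pvCeilDiv_bounds n w (by omega)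
  set cs := pvCeilDiv n w with hcs
  have hcs0 : cs ≤ 0 := by nlinarith
  rw [if_pos hcs0]

-- inside D_: A returns the single chunk [(0, n)]
theorem aSingleton_of_D (n w : Int) (hn : n ≤ 0) (hw : 1 ≤ w) :
    compute_chunk_ranges n w = [(0, n)] := by
  unfold compute_chunk_ranges
  obtain ⟨hub, hlb⟩ := pvCeilDiv_bounds n w (by omega)
  set cs := pvCeilDiv n w with hcs
  have hcs0 : cs ≤ 0 := by nlinarith
  have hncs : n ≤ cs := by nlinarith
  obtain ⟨fuel, hfuel⟩ : ∃ k, w.toNat = k + 1 := ⟨w.toNat - 1, by omega⟩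
  rw [hfuel]
  simp only [aChunkLoop]
  have : min (0 + cs) n = n := by omega
  rw [this, if_pos le_rfl]

-- ===== VERDICT (by name: the statements are the Claim_ definitions above) =====
theorem compute_chunk_ranges_spec : Claim_unchanged_compute_chunk_ranges := by
  intro n w _ hw hD
  unfold Pre_compute_chunk_ranges at hw
  unfold D_compute_chunk_ranges at hD
  push Not at hD
  simp only [compute_chunk_ranges, compute_chunk_ranges_alt]
  by_cases hwp : w ≤ 0
  · -- w < 0: A's loop has fuel 0; B's start range is empty (or chunk_size ≤ 0)
    have h0 : w.toNat = 0 := by omega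
    rw [h0]
    by_cases hcsp : pvCeilDiv n w ≤ 0
    · rw [if_pos hcsp]; rfl
    · -- chunk_size > 0 with w < 0 forces n < 0, so range(0, n_tasks, cs) is empty
      have hwneg : (0:Int) < -w := by omega
      have hfd : PySem.Int.floordiv (-n) w = PySem.Int.floordiv n (-w) := by
        have := PySem.Int.floordiv_neg_neg n (-w)
        simpa using this
      have hn0 : n ≤ 0 := by
        by_contra hn
        have h1 : (0:Int) ≤ n / (-w) :=
          (Int.le_ediv_iff_mul_le hwneg).mpr (by nlinarith)
        have : pvCeilDiv n w ≤ 0 := by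
          unfold pvCeilDiv
          rw [hfd, PySem.Int.floordiv_eq_ediv_of_pos hwneg]
          omega
        omega
      rw [if_neg hcsp, PySem.List.pyRange_of_pos 0 n (by omega),
          if_neg (by omega : ¬ (0:Int) < n)]
      rfl
  · rw [not_le] at hwp
    have hn : 0 < n := by omega
    obtain ⟨hub, hlb⟩ := pvCeilDiv_bounds n w hwp
    set cs := pvCeilDiv n w with hcs
    have hcs1 : 1 ≤ cs := by nlinarith
    obtain ⟨hub2, hlb2⟩ := pvCeilDiv_bounds n cs hcs1
    set c := pvCeilDiv n cs with hcdef
    have hc0 : 0 < c := by nlinarith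
    have hcw : c ≤ w := by nlinarith
    have hmin : min w c = c := by omega
    rw [if_neg (by omega : ¬ cs ≤ 0),
        PySem.List.pyRange_of_pos 0 n (by omega : (0:Int) < cs),
        if_pos hn, bCount_eq n cs hn hcs1 hlb2 hub2]
    have hA := aChunkLoop_eq n cs w hn hcs1 hlb2 hub2 w.toNat 0 le_rfl (by omega) (by omega)
    rw [zero_mul] at hA
    rw [hA, ← hcdef, hmin, PySem.List.pyRange_one, List.map_map, List.map_map]
    simp only [sub_zero]
    apply List.map_congr_left
    intro k _
    simp only [Function.comp_apply]
    have h1 : (0 + (k:Int)) * cs = 0 + cs * k := by ring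
    have h2 : (0 + (k:Int) + 1) * cs = 0 + cs * k + cs := by ring
    rw [h1, h2]

theorem compute_chunk_ranges_changed : Claim_changed_compute_chunk_ranges := by
  unfold Claim_changed_compute_chunk_ranges; decide

theorem compute_chunk_ranges_tight : Claim_exact_compute_chunk_ranges := by
  intro n w _ _ hD
  obtain ⟨hn, hw⟩ := hD
  rw [aSingleton_of_D n w hn hw, bNil_of_D n w hn hw]
  simp
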